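-- pv_equiv track=rewrite | github.com/wherby/code | contest/00000c490d177/c490/q2/t2.py | isDigitorialPermutation
-- ===== SOURCE A (Python) =====
-- import math
--
-- def isDigitorialPermutation(n: int) -> bool:
--     ls = list(str(n))
--     acc = 0
--     for a in ls:
--         acc += math.factorial(int(a))
--     ls.sort()
--     ls2 = list(str(acc))
--     ls2.sort()
--     return ls == ls2
-- ===== SOURCE B (Python) =====
-- import math
--
-- def isDigitorialPermutation(n: int) -> bool:
--     # Same digit-factorial accumulation; sort-and-compare replaced by a
--     # length-10 frequency table (count up on str(n), down on str(acc)).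
--     acc = 0
--     cnt = [0] * 10
--     for a in str(n):
--         acc += math.factorial(int(a))
--         cnt[int(a)] += 1
--     for c in str(acc):
--         cnt[int(c)] -= 1
--     return all(v == 0 for v in cnt)
-- ===== Notes on version B (the rewrite author's own statement) =====
-- stated objective: alternative
-- what changed: The sort-both-digit-lists-and-compare tail is replaced by a single length-10 frequency table, incremented over str(n) and decremented over str(acc), returning whether all counters are zero; no sorting and no second list are built.
import Mathlib
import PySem

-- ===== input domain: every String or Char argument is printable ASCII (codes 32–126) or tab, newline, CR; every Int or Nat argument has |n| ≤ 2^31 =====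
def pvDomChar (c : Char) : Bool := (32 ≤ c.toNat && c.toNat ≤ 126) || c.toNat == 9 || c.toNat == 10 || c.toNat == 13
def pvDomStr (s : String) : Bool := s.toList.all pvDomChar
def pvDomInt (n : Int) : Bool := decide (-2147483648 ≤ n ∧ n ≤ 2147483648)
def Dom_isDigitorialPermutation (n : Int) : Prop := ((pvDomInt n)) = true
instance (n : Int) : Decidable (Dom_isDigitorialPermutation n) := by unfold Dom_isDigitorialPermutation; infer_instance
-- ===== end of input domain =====

-- B replaces A's sort-both-digit-lists comparison by a length-10 frequency table
-- (count up over str(n), down over str(acc)); same digit-factorial accumulation.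


-- ===== PORT A =====
-- math.factorial(int(a)): int(a) is PySem.Int.ofChars? [a]; the `.getD 0` / `.toNat`
-- defaults are only reached where Python raises ValueError (non-digit character, i.e. the
-- '-' of a negative n), which Pre_ excludes.
def pyFactChar (a : Char) : Int :=
  Int.ofNat (Nat.factorial ((PySem.Int.ofChars? [a]).getD 0).toNat)

def isDigitorialPermutation (n : Int) : Bool :=
  let ls := (PySem.Int.toStr n).toList
  let acc := ls.foldl (fun acc a => acc + pyFactChar a) 0
  let ls1 := PySem.List.sorted ls (fun x => x) false
  let ls2 := PySem.List.sorted (PySem.Int.toStr acc).toList (fun x => x) false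
  ls1 == ls2

-- ===== PORT B =====
-- int(a) as an index into the 10-slot table; for in-range indices 0..9 Python's
-- `cnt[i] += 1` / `-= 1` is exactly List.getD + List.set (never out of range under Pre_).
def digitVal (a : Char) : Nat := ((PySem.Int.ofChars? [a]).getD 0).toNat

def isDigitorialPermutation_alt (n : Int) : Bool :=
  let st := (PySem.Int.toStr n).toList.foldl
    (fun (p : Int × List Int) a =>
      (p.1 + pyFactChar a,
       p.2.set (digitVal a) (p.2.getD (digitVal a) 0 + 1)))
    (0, List.replicate 10 (0 : Int))
  let cnt := (PySem.Int.toStr st.1).toList.foldl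
    (fun (c : List Int) a => c.set (digitVal a) (c.getD (digitVal a) 0 - 1)) st.2
  cnt.all (fun v => v == 0)

-- ===== PRECONDITION & SPEC =====
-- On every negative n both programs raise ValueError (int('-')): Pre_ is 0 ≤ n.
def Pre_isDigitorialPermutation (n : Int) : Prop := 0 ≤ n
instance (n : Int) : Decidable (Pre_isDigitorialPermutation n) := by unfold Pre_isDigitorialPermutation; infer_instance
def pvWitness_isDigitorialPermutation : Int := (145)

def Spec_isDigitorialPermutation (n : Int) (out : Bool) : Prop := out = isDigitorialPermutation_alt n
instance (n : Int) (out : Bool) : Decidable (Spec_isDigitorialPermutation n out) := by unfold Spec_isDigitorialPermutation; infer_instance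

-- ===== CLAIM (what is proved, stated in full; the proofs are below) =====
def Claim_equal_isDigitorialPermutation : Prop := ∀ (n : Int), Dom_isDigitorialPermutation n → Pre_isDigitorialPermutation n → Spec_isDigitorialPermutation n (isDigitorialPermutation n)

-- ===== LEMMAS AND PROOFS =====

-- B's fold over the (acc, histogram) pair is the pair of the two independent folds
theorem foldl_pair : ∀ (L : List Char) (x : Int) (y : List Int),
    L.foldl (fun (p : Int × List Int) a =>
        (p.1 + pyFactChar a, p.2.set (digitVal a) (p.2.getD (digitVal a) 0 + 1))) (x, y)
      = (L.foldl (fun acc a => acc + pyFactChar a) x,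
         L.foldl (fun c a => c.set (digitVal a) (c.getD (digitVal a) 0 + 1)) y) := by
  intro L
  induction L with
  | nil => intro x y; rfl
  | cons a t ih => intro x y; rw [List.foldl_cons, List.foldl_cons, List.foldl_cons]; exact ih _ _

theorem fact_fold_nonneg : ∀ (L : List Char) (x : Int), 0 ≤ x →
    0 ≤ L.foldl (fun acc a => acc + pyFactChar a) x := by
  intro L
  induction L with
  | nil => intro x hx; simpa using hx
  | cons a t ih =>
      intro x hx
      simp only [List.foldl]
      exact ih _ (by have : (0:Int) ≤ pyFactChar a := Int.natCast_nonneg _; omega)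

theorem digits_of_toStr (m : Int) (hm : 0 ≤ m) :
    ∀ c ∈ (PySem.Int.toStr m).toList, c.isDigit = true := by
  intro c hc
  rw [PySem.Int.toList_toStr] at hc
  simp only [PySem.Int.toChars, if_neg (by omega : ¬ m < 0)] at hc
  exact Nat.isDigit_of_mem_toDigits (by norm_num) (by norm_num) hc

theorem digit_mem (c : Char) (h : c.isDigit = true) :
    c ∈ ['0','1','2','3','4','5','6','7','8','9'] := by
  simp [Char.isDigit] at h
  have h1 : 48 ≤ c.toNat := h.1
  have h2 : c.toNat ≤ 57 := h.2
  have hofn : c = Char.ofNat c.toNat := (Char.ofNat_toNat c).symm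
  interval_cases hc : c.toNat <;> simp_all

theorem digitVal_lt (c : Char) (h : c.isDigit = true) : digitVal c < 10 := by
  have hm := digit_mem c h
  simp only [List.mem_cons, List.not_mem_nil, or_false] at hm
  rcases hm with rfl | rfl | rfl | rfl | rfl | rfl | rfl | rfl | rfl | rfl <;> decide

theorem digitVal_inj (a c : Char) (ha : a.isDigit = true) (hc : c.isDigit = true)
    (h : digitVal a = digitVal c) : a = c := by
  have hma := digit_mem a ha
  have hmc := digit_mem c hc
  simp only [List.mem_cons, List.not_mem_nil, or_false] at hma hmc
  rcases hma with rfl | rfl | rfl | rfl | rfl | rfl | rfl | rfl | rfl | rfl <;>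
    rcases hmc with rfl | rfl | rfl | rfl | rfl | rfl | rfl | rfl | rfl | rfl <;>
      first | rfl | (exfalso; revert h; decide)

-- one histogram-update pass, characterised slot by slot
theorem hist_foldl (δ : Int) :
    ∀ (L : List Char) (b : List Int), b.length = 10 → (∀ a ∈ L, a.isDigit = true) →
      (L.foldl (fun c a => c.set (digitVal a) (c.getD (digitVal a) 0 + δ)) b).length = 10 ∧
      ∀ i, i < 10 →
        (L.foldl (fun c a => c.set (digitVal a) (c.getD (digitVal a) 0 + δ)) b).getD i 0
          = b.getD i 0 + δ * (L.countP (fun a => digitVal a == i) : Int) := by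
  intro L
  induction L with
  | nil => intro b hb _; exact ⟨hb, by simp⟩
  | cons a t ih =>
      intro b hb hdig
      have hda : a.isDigit = true := hdig a (List.mem_cons_self)
      have hlt : digitVal a < 10 := digitVal_lt a hda
      have hb' : (b.set (digitVal a) (b.getD (digitVal a) 0 + δ)).length = 10 := by
        simp [List.length_set, hb]
      obtain ⟨hlen, hval⟩ := ih _ hb' (fun x hx => hdig x (List.mem_cons_of_mem _ hx))
      refine ⟨hlen, ?_⟩
      intro i hi
      rw [List.foldl_cons, hval i hi]
      have hset : (b.set (digitVal a) (b.getD (digitVal a) 0 + δ)).getD i 0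
          = if digitVal a = i then b.getD i 0 + δ else b.getD i 0 := by
        have hib : i < b.length := by omega
        rw [List.getD_eq_getElem _ _ (by simp [List.length_set]; omega),
            List.getElem_set]
        split_ifs with hai
        · subst hai; rw [List.getD_eq_getElem _ _ hib]
        · rw [List.getD_eq_getElem _ _ hib]
      rw [hset, List.countP_cons]
      by_cases hai : digitVal a = i
      · simp only [hai, beq_self_eq_true, if_true]
        push_cast; ring
      · simp [hai]

theorem all_zero_iff (cnt : List Int) (h : cnt.length = 10) :
    (cnt.all (fun v => v == 0) = true) ↔ ∀ i, i < 10 → cnt.getD i 0 = 0 := by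
  rw [List.all_eq_true]
  constructor
  · intro hall i hi
    have hi' : i < cnt.length := by omega
    have := hall cnt[i] (List.getElem_mem hi')
    rw [List.getD_eq_getElem _ _ hi']
    simpa using this
  · intro hz v hv
    rcases List.mem_iff_getElem.mp hv with ⟨i, hi, rfl⟩
    have := hz i (by omega)
    rw [List.getD_eq_getElem _ _ hi] at this
    simpa using this

theorem countP_eq_count (L : List Char) (hL : ∀ a ∈ L, a.isDigit = true)
    (c : Char) (hc : c.isDigit = true) :
    L.countP (fun a => digitVal a == digitVal c) = L.count c := by
  unfold List.count
  apply List.countP_congr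
  intro a ha
  have hda := hL a ha
  constructor
  · intro h
    have : digitVal a = digitVal c := by simpa using h
    simp [digitVal_inj a c hda hc this]
  · intro h
    have : a = c := by simpa using h
    subst this; simp

theorem perm_iff_hist (L1 L2 : List Char)
    (h1 : ∀ a ∈ L1, a.isDigit = true) (h2 : ∀ a ∈ L2, a.isDigit = true) :
    L1.Perm L2 ↔ ∀ i, i < 10 →
      L1.countP (fun a => digitVal a == i) = L2.countP (fun a => digitVal a == i) := by
  constructor
  · intro hp i _; exact hp.countP_eq _
  · intro hcnt
    rw [List.perm_iff_count]
    intro c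
    by_cases hc : c.isDigit = true
    · rw [← countP_eq_count L1 h1 c hc, ← countP_eq_count L2 h2 c hc]
      exact hcnt (digitVal c) (digitVal_lt c hc)
    · rw [List.count_eq_zero.mpr (fun hm => hc (h1 c hm)),
          List.count_eq_zero.mpr (fun hm => hc (h2 c hm))]

-- ===== VERDICT (by name: the statement is the Claim_ definition above) =====
set_option maxHeartbeats 1000000 in
theorem isDigitorialPermutation_spec : Claim_equal_isDigitorialPermutation := by
  intro n _ hpre
  unfold Spec_isDigitorialPermutation isDigitorialPermutation isDigitorialPermutation_alt
  simp only []
  set L1 := (PySem.Int.toStr n).toList with hL1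
  set acc := L1.foldl (fun acc a => acc + pyFactChar a) 0 with hacc
  simp only [foldl_pair]
  simp only [sub_eq_add_neg]
  set L2 := (PySem.Int.toStr acc).toList with hL2
  have hd1 : ∀ a ∈ L1, a.isDigit = true := digits_of_toStr n hpre
  have hd2 : ∀ a ∈ L2, a.isDigit = true :=
    digits_of_toStr acc (fact_fold_nonneg L1 0 le_rfl)
  -- histogram after the two passes
  obtain ⟨hlen1, hval1⟩ := hist_foldl 1 L1 (List.replicate 10 0) (by simp) hd1
  obtain ⟨hlen2, hval2⟩ := hist_foldl (-1) L2 _ hlen1 hd2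
  have hfin : ∀ i, i < 10 →
      ((L2.foldl (fun c a => c.set (digitVal a) (c.getD (digitVal a) 0 + -1))
        (L1.foldl (fun c a => c.set (digitVal a) (c.getD (digitVal a) 0 + 1))
          (List.replicate 10 0))).getD i 0)
        = (L1.countP (fun a => digitVal a == i) : Int)
          - (L2.countP (fun a => digitVal a == i) : Int) := by
    intro i hi
    rw [hval2 i hi, hval1 i hi, List.getD_replicate]
    · ring
    · omega
  rw [Bool.eq_iff_iff, beq_iff_eq, PySem.List.sorted_id_eq_sorted_id_iff_perm,
    all_zero_iff _ hlen2, perm_iff_hist L1 L2 hd1 hd2]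
  constructor
  · intro hc i hi
    rw [hfin i hi, hc i hi]; ring
  · intro hz i hi
    have := hfin i hi; rw [hz i hi] at this; omega
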